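-- pv_equiv track=rewrite | github.com/Rivoll/TicTacToe | Board.py | count_diag2
-- ===== SOURCE A (Python) =====
-- def count_diag2(board, symbol):
--     i = 2
--     j = 0
--     count = 0
--     while i > -1:
--         if board[j][i] == symbol:
--             count += 1
--         elif board[j][i] != ' ':
--             return 0
--         i -= 1
--         j += 1
--     return count
-- ===== SOURCE B (Python) =====
-- def count_diag2(board, symbol):
--     cells = [board[0][2], board[1][1], board[2][0]]
--     if any(c != ' ' and c != symbol for c in cells):
--         return 0
--     return cells.count(symbol)
-- ===== Notes on version B (the rewrite author's own statement) =====
-- stated objective: simpler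
-- what changed: Replaces the interleaved while-loop with moving i/j indices by extracting the three anti-diagonal cells once, then a separate opponent-guard pass (any) and a count pass (list.count).
-- outside the precondition, e.g. on count_diag2([['x', 'x', 'Q']], 'O'): A returns 0, B raises IndexError
import Mathlib
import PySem

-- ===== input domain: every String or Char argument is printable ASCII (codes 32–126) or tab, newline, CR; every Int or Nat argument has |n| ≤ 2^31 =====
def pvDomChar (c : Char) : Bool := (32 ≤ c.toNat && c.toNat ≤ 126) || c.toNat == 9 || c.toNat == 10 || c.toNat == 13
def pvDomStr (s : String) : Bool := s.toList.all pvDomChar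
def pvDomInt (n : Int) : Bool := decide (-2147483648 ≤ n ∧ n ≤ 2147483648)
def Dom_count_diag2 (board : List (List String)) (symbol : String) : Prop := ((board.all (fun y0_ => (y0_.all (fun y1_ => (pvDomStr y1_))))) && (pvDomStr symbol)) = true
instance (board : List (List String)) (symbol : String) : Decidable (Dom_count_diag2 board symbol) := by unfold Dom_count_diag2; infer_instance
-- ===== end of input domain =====

-- B replaces A's interleaved counting/early-exit while-loop by extracting the three
-- anti-diagonal cells once, then a guard pass (any) and a count pass; objective: simpler.


-- ===== PORT A =====
-- Literal port of A's while-loop: indices i,j move together, counting matches and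
-- returning 0 on a foreign non-blank cell; fuel 3 = the loop's 3 iterations (i = 2,1,0).
def count_diag2_go (board : List (List String)) (symbol : String) :
    Nat → Int → Int → Int → Int
  | 0, _, _, count => count
  | fuel + 1, i, j, count =>
    if i > -1 then
      match (PySem.List.pyGet? board j).bind (fun row => PySem.List.pyGet? row i) with
      | none => 0  -- IndexError in Python; excluded by Pre_count_diag2
      | some cell =>
        if cell == symbol then count_diag2_go board symbol fuel (i - 1) (j + 1) (count + 1)
        else if cell != " " then 0
        else count_diag2_go board symbol fuel (i - 1) (j + 1) count
    else count

def count_diag2 (board : List (List String)) (symbol : String) : Int :=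
  count_diag2_go board symbol 3 2 0 0

-- ===== PORT B =====
def count_diag2_alt (board : List (List String)) (symbol : String) : Int :=
  match (PySem.List.pyGet? board 0).bind (fun row => PySem.List.pyGet? row 2),
        (PySem.List.pyGet? board 1).bind (fun row => PySem.List.pyGet? row 1),
        (PySem.List.pyGet? board 2).bind (fun row => PySem.List.pyGet? row 0) with
  | some c0, some c1, some c2 =>
    let cells := [c0, c1, c2]
    if cells.any (fun c => c != " " && c != symbol) then 0
    else PySem.List.count cells symbol
  | _, _, _ => 0  -- IndexError in Python; excluded by Pre_count_diag2

-- ===== PRECONDITION & SPEC =====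
-- Pre_ excludes boards missing part of the anti-diagonal: there A either raises
-- IndexError or (via its early 'return 0' on a foreign cell) returns 0 before
-- reaching the missing cell, while B's list-build raises IndexError.
def Pre_count_diag2 (board : List (List String)) (symbol : String) : Prop :=
  2 < board.length ∧ 2 < (board.getD 0 []).length ∧
  1 < (board.getD 1 []).length ∧ 0 < (board.getD 2 []).length
instance (board : List (List String)) (symbol : String) : Decidable (Pre_count_diag2 board symbol) := by unfold Pre_count_diag2; infer_instance

def pvWitness_count_diag2 : List (List String) × String :=
  ([["X", "O", "X"], [" ", "X", "O"], ["X", "O", " "]], "X")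

def Spec_count_diag2 (board : List (List String)) (symbol : String) (out : Int) : Prop := out = count_diag2_alt board symbol
instance (board : List (List String)) (symbol : String) (out : Int) : Decidable (Spec_count_diag2 board symbol out) := by unfold Spec_count_diag2; infer_instance

-- ===== CLAIM (what is proved, stated in full; the proofs are below) =====
def Claim_equal_count_diag2 : Prop := ∀ (board : List (List String)) (symbol : String), Dom_count_diag2 board symbol → Pre_count_diag2 board symbol → Spec_count_diag2 board symbol (count_diag2 board symbol)

-- ===== LEMMAS AND PROOFS =====

theorem pv_key (a2 b1 c0 symbol : String) :
    (if a2 = symbol then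
      if b1 = symbol then if c0 = symbol then (3:Int) else if c0 = " " then 2 else 0
      else if b1 = " " then if c0 = symbol then 2 else if c0 = " " then 1 else 0 else 0
    else
      if a2 = " " then
        if b1 = symbol then if c0 = symbol then 2 else if c0 = " " then 1 else 0
        else if b1 = " " then if c0 = symbol then 1 else 0 else 0
      else 0) =
    if ¬a2 = " " ∧ ¬a2 = symbol ∨ ¬b1 = " " ∧ ¬b1 = symbol ∨ ¬c0 = " " ∧ ¬c0 = symbol then 0
    else ((List.count symbol [a2, b1, c0] : Nat) : Int) := by
  split_ifs <;> simp_all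

-- ===== VERDICT (by name: the statement is the Claim_ definition above) =====
theorem count_diag2_spec : Claim_equal_count_diag2 := by
  intro board symbol _ hpre
  obtain ⟨h0, h1, h2, h3⟩ := hpre
  match board, h0 with
  | r0 :: r1 :: r2 :: rest, _ =>
  simp only [List.getD, List.getElem?_cons_zero] at h1 h2 h3
  match r0, h1 with
  | a0 :: a1 :: a2 :: t0, _ =>
  match r1, h2 with
  | b0 :: b1 :: t1, _ =>
  match r2, h3 with
  | c0 :: t2, _ =>
  have g0 : PySem.List.pyGet? ((a0 :: a1 :: a2 :: t0) :: (b0 :: b1 :: t1) :: (c0 :: t2) :: rest) (0 : Int) = some (a0 :: a1 :: a2 :: t0) := by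
    simpa using PySem.List.pyGet?_natCast (n := 0) (xs := (a0 :: a1 :: a2 :: t0) :: (b0 :: b1 :: t1) :: (c0 :: t2) :: rest)
  have g1 : PySem.List.pyGet? ((a0 :: a1 :: a2 :: t0) :: (b0 :: b1 :: t1) :: (c0 :: t2) :: rest) (1 : Int) = some (b0 :: b1 :: t1) := by
    simpa using PySem.List.pyGet?_natCast (n := 1) (xs := (a0 :: a1 :: a2 :: t0) :: (b0 :: b1 :: t1) :: (c0 :: t2) :: rest)
  have g2 : PySem.List.pyGet? ((a0 :: a1 :: a2 :: t0) :: (b0 :: b1 :: t1) :: (c0 :: t2) :: rest) (2 : Int) = some (c0 :: t2) := by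
    simpa using PySem.List.pyGet?_natCast (n := 2) (xs := (a0 :: a1 :: a2 :: t0) :: (b0 :: b1 :: t1) :: (c0 :: t2) :: rest)
  have gr0 : PySem.List.pyGet? (a0 :: a1 :: a2 :: t0) (2 : Int) = some a2 := by
    simpa using PySem.List.pyGet?_natCast (n := 2) (xs := a0 :: a1 :: a2 :: t0)
  have gr1 : PySem.List.pyGet? (b0 :: b1 :: t1) (1 : Int) = some b1 := by
    simpa using PySem.List.pyGet?_natCast (n := 1) (xs := b0 :: b1 :: t1)
  have gr2 : PySem.List.pyGet? (c0 :: t2) (0 : Int) = some c0 := by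
    simpa using PySem.List.pyGet?_natCast (n := 0) (xs := c0 :: t2)
  simp only [Spec_count_diag2, count_diag2, count_diag2_go, count_diag2_alt]
  norm_num [g0, g1, g2, gr0, gr1, gr2]
  exact pv_key a2 b1 c0 symbol
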